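-- pv_equiv track=rewrite | github.com/pravash02/interviewbit_programs | maths/sorted_permutation_rank.py | srt_permB
-- ===== SOURCE A (Python) =====
-- import math
--
-- def srt_permB(A):
--     A = list(A)
--     chars = sorted(A)
--     count = 1
--     i = 0
--     while i < len(A):
--         index = chars.index(A[i])
--         if index != 0:
--             ### starting index from 1 for finding the factorial
--             count += math.factorial(len(A) - i - 1) * index
--         else:
--             if chars[i:] == A[i:]:
--                 break
--         chars.pop(index)
--         A.pop(i)
--
--     return (count) % 1000003
-- ===== SOURCE B (Python) =====
-- def srt_permB(A):
--     # Single reverse pass: a 256-slot code-frequency table counts smaller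
--     # remaining characters, and the factorial is built up modularly on the fly.
--     MOD = 1000003
--     cnt = [0] * 256
--     f = 1      # j! % MOD, j = number of characters processed so far
--     j = 0
--     rank = 1
--     for c in reversed(A):
--         o = ord(c)
--         rank = (rank + sum(cnt[:o]) * f) % MOD
--         cnt[o] += 1
--         j += 1
--         f = f * j % MOD
--     return rank
-- ===== Notes on version B (the rewrite author's own statement) =====
-- stated objective: faster
-- what changed: Replaces the quadratic pop/index-into-sorted-copy loop with exact big-integer factorials by a single reverse pass that counts strictly-smaller remaining characters in a 256-slot code-frequency table and accumulates the rank with an incrementally maintained modular factorial.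
import Mathlib
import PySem

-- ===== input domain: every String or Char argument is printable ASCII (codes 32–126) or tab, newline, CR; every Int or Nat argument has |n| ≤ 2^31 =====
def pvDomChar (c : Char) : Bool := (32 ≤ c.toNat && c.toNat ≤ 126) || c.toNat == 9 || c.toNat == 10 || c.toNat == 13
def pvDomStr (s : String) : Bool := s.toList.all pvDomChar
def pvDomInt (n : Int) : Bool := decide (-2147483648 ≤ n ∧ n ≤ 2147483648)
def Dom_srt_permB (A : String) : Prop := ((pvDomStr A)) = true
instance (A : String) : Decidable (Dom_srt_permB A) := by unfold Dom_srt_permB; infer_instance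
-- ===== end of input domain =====

-- B replaces A's quadratic pop/index loop with exact big-integer factorials by a single
-- reverse pass over the string using a 256-slot code-frequency table and an incrementally
-- maintained modular factorial (measured faster; same return value on the stated domain).

-- ===== PORT A =====
-- Literal port of A's while loop. State: remaining list Al, sorted remaining chars,
-- running count, loop variable i (A never increments it; it stays in the state anyway).
-- fuel makes the recursion structural; fuel = len(A) suffices since each iteration pops one
-- element.  The `none` fallbacks mark branches where Python would raise (IndexError /
-- ValueError); they are unreachable for the initial arguments srt_permB passes.
def srt_permA_loop : Nat → List Char → List Char → Int → Int → Int
  | 0, _, _, count, _ => count % 1000003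
  | fuel + 1, Al, chars, count, i =>
    if i < (Al.length : Int) then
      match PySem.List.pyGet? Al i with
      | none => count % 1000003      -- IndexError: unreachable (0 ≤ i < len Al)
      | some a =>
        match PySem.List.index? chars a with
        | none => count % 1000003    -- ValueError: unreachable (a ∈ chars)
        | some index =>
          if index ≠ 0 then
            -- count += factorial(len(A) - i - 1) * index   (toNat: the argument is ≥ 0 here)
            match PySem.List.pop? chars (index : Int), PySem.List.pop? Al i with
            | some (_, chars'), some (_, Al') =>
              srt_permA_loop fuel Al' chars'
                (count + ((((Al.length : Int) - i - 1).toNat.factorial : Int)) * (index : Int)) i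
            | _, _ => count % 1000003
          else
            if PySem.List.slice chars (some i) none = PySem.List.slice Al (some i) none then
              count % 1000003        -- break
            else
              match PySem.List.pop? chars (index : Int), PySem.List.pop? Al i with
              | some (_, chars'), some (_, Al') => srt_permA_loop fuel Al' chars' count i
              | _, _ => count % 1000003
    else count % 1000003

def srt_permB (A : String) : Int :=
  srt_permA_loop A.toList.length A.toList (PySem.List.sorted A.toList (fun x => x) false) 1 0

-- ===== PORT B =====
-- One step of B's loop over reversed(A): state (cnt, f, j, rank);
-- rank += sum(cnt[:ord(c)]) * f  (mod M);  cnt[ord(c)] += 1;  j += 1;  f = f * j % M.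
def altStep (s : List Int × Int × Int × Int) (c : Char) : List Int × Int × Int × Int :=
  let o := c.toNat
  let rank := (s.2.2.2 + (s.1.take o).sum * s.2.1) % 1000003
  let cnt := s.1.set o (s.1.getD o 0 + 1)
  let j := s.2.2.1 + 1
  (cnt, s.2.1 * j % 1000003, j, rank)

def srt_permB_alt (A : String) : Int :=
  (A.toList.reverse.foldl altStep (List.replicate 256 0, 1, 0, 1)).2.2.2

-- ===== PRECONDITION & SPEC =====
def Spec_srt_permB (A : String) (out : Int) : Prop := out = srt_permB_alt A
instance (A : String) (out : Int) : Decidable (Spec_srt_permB A out) := by unfold Spec_srt_permB; infer_instance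

-- ===== CLAIM (what is proved, stated in full; the proofs are below) =====
def Claim_equal_srt_permB : Prop := ∀ (A : String), Dom_srt_permB A → Spec_srt_permB A (srt_permB A)

-- ===== LEMMAS AND PROOFS =====

-- number of elements of t strictly smaller than c
def cntSm (t : List Char) (c : Char) : Nat := t.countP (fun x => decide (x < c))

-- the exact (un-reduced) rank offset A accumulates: sum of (len-1-i)! * #(smaller among suffix)
def pvS : List Char → Nat
  | [] => 0
  | c :: t => t.length.factorial * cntSm t c + pvS t

lemma char_lt_iff (a b : Char) : a < b ↔ a.toNat < b.toNat := by
  rw [Char.lt_def, UInt32.lt_iff_toNat_lt]; rfl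

lemma S_of_sorted : ∀ l : List Char, l.Pairwise (· ≤ ·) → pvS l = 0 := by
  intro l hl
  induction l with
  | nil => rfl
  | cons c t ih =>
    rcases List.pairwise_cons.mp hl with ⟨hc, ht⟩
    have : cntSm t c = 0 := by
      apply List.countP_eq_zero.mpr
      intro x hx
      simpa using not_lt_of_ge (hc x hx)
    simp [pvS, this, ih ht]

lemma index?_sorted : ∀ (chars : List Char) (c : Char), chars.Pairwise (· ≤ ·) → c ∈ chars →
    PySem.List.index? chars c = some (chars.countP (fun x => decide (x < c))) := by
  intro chars c hs hc
  induction chars with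
  | nil => simp at hc
  | cons x t ih =>
    rcases List.pairwise_cons.mp hs with ⟨hx, ht⟩
    by_cases hxc : x = c
    · subst hxc
      have : (x :: t).countP (fun y => decide (y < x)) = 0 := by
        apply List.countP_eq_zero.mpr
        intro y hy
        rcases List.mem_cons.mp hy with h | h
        · simp [h]
        · simpa using not_lt_of_ge (hx y h)
      rw [PySem.List.index?_cons_self, this]
    · have hct : c ∈ t := by
        rcases List.mem_cons.mp hc with h | h
        · exact absurd h.symm hxc
        · exact h
      have hxltc : x < c := lt_of_le_of_ne (hx c hct) hxc
      rw [PySem.List.index?_cons_of_ne t hxc, ih ht hct]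
      simp [hxltc]

lemma eraseIdx_append_len (l₁ l₂ : List Char) (i : Nat) :
    (l₁ ++ l₂).eraseIdx (l₁.length + i) = l₁ ++ l₂.eraseIdx i := by
  induction l₁ with
  | nil => simp
  | cons x t ih => simp [Nat.succ_add, ih]

lemma loopA_eq : ∀ (fuel : Nat) (l chars : List Char) (count : Int),
    l.length ≤ fuel → chars.Perm l → chars.Pairwise (· ≤ ·) →
    srt_permA_loop fuel l chars count 0 = (count + (pvS l : Int)) % 1000003 := by
  intro fuel
  induction fuel with
  | zero =>
    intro l chars count hlen _ _
    have : l = [] := List.length_eq_zero_iff.mp (Nat.le_zero.mp hlen)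
    subst this
    simp [srt_permA_loop, pvS]
  | succ fuel ih =>
    intro l chars count hlen hperm hs
    cases l with
    | nil => simp [srt_permA_loop, pvS]
    | cons c t =>
      have hc : c ∈ chars := hperm.mem_iff.mpr (List.mem_cons_self)
      have hidx := index?_sorted chars c hs hc
      set k := chars.countP (fun x => decide (x < c)) with hkdef
      have hkcnt : k = cntSm t c := by
        rw [hkdef, hperm.countP_eq]
        simp [cntSm]
      obtain ⟨pre, suf, hchars, hklen, hcpre⟩ := (PySem.List.index?_eq_some_iff chars c k).mp hidx
      have hklt : k < chars.length := by
        rw [hchars]; simp; omega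
      have hpop : PySem.List.pop? chars (k : Int) = some (chars[k], chars.eraseIdx k) :=
        PySem.List.pop?_natCast chars k hklt
      have herase : chars.eraseIdx k = pre ++ suf := by
        rw [hchars, ← hklen]
        have := eraseIdx_append_len pre (c :: suf) 0
        simpa using this
      have hperm' : (pre ++ suf).Perm t := by
        have h1 : (pre ++ c :: suf).Perm (c :: (pre ++ suf)) := List.perm_middle
        have h2 : (c :: (pre ++ suf)).Perm (c :: t) := h1.symm.trans (hchars ▸ hperm)
        exact h2.cons_inv
      have hs' : (pre ++ suf).Pairwise (· ≤ ·) := by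
        have hsub : (pre ++ suf).Sublist (pre ++ c :: suf) :=
          (List.sublist_cons_self c suf).append_left pre
        exact (hchars ▸ hs).sublist hsub
      have hlen' : t.length ≤ fuel := by simpa using hlen
      have hcond : (0 : Int) < (((c :: t) : List Char).length : Int) := by
        simp
      by_cases hk0 : k = 0
      · -- index == 0 branch
        have hScons : pvS (c :: t) = pvS t := by
          simp [pvS, ← hkcnt, hk0]
        by_cases heq : chars = c :: t
        · -- break: remaining already sorted
          have h0 : pvS (c :: t) = 0 := S_of_sorted _ (heq ▸ hs)
          have hidx2 : PySem.List.index? (c :: t) c = some k := heq ▸ hidx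
          have hidx3 : List.idxOf? c (c :: t) = some k := by simpa using hidx2
          simp [srt_permA_loop, hidx3, hk0, heq, h0,
            PySem.List.slice_zero_start, PySem.List.slice_none_none]
        · have hslice : ¬ (PySem.List.slice chars (some 0) none =
              PySem.List.slice (c :: t) (some 0) none) := by
            simpa [PySem.List.slice_zero_start, PySem.List.slice_none_none] using heq
          have hpre : pre = [] := List.length_eq_zero_iff.mp (by rw [hklen, hk0])
          have hchars0 : chars = c :: suf := by rw [hchars, hpre]; rfl
          have hpop0 : PySem.List.pop? chars 0 = some (c, suf) := by
            rw [hchars0]; exact PySem.List.pop?_zero_cons c suf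
          have hsuf : pre ++ suf = suf := by rw [hpre]; rfl
          rw [hScons]
          simp only [srt_permA_loop, hcond, if_pos, PySem.List.pyGet?_zero_cons, hidx, hk0,
            ite_not, if_neg hslice, Int.natCast_zero, hpop0, PySem.List.pop?_zero_cons]
          rw [hsuf] at hperm' hs'
          exact ih t suf count hlen' hperm' hs'
      · -- index != 0 branch
        have hfact : (((((c :: t) : List Char).length : Int) - 0 - 1).toNat.factorial : Int)
            = (t.length.factorial : Int) := by
          norm_num
        simp only [srt_permA_loop, hcond, if_pos, PySem.List.pyGet?_zero_cons, hidx]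
        rw [if_pos hk0]
        rw [hpop, PySem.List.pop?_zero_cons]
        rw [herase, hfact]
        change srt_permA_loop fuel t (pre ++ suf) _ 0 = _
        rw [ih t (pre ++ suf) _ hlen' hperm' hs']
        congr 1
        simp only [pvS, ← hkcnt]
        push_cast
        ring

-- the 256-slot code-frequency table for the multiset of t
def codeTab (t : List Char) : List Int :=
  (List.range 256).map (fun v => (t.countP (fun x => decide (x.toNat = v)) : Int))

lemma countP_lt_succ (t : List Char) (o : Nat) :
    t.countP (fun x => decide (x.toNat < o + 1))
      = t.countP (fun x => decide (x.toNat < o)) + t.countP (fun x => decide (x.toNat = o)) := by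
  induction t with
  | nil => simp
  | cons c t ih =>
    simp only [List.countP_cons, ih]
    by_cases h1 : c.toNat < o
    · have h1' : c.toNat < o + 1 := by omega
      have h2 : ¬ c.toNat = o := by omega
      simp [h1, h1', h2]
      omega
    · by_cases h2 : c.toNat = o
      · have h1' : c.toNat < o + 1 := by omega
        simp [h2]
        omega
      · have h1' : ¬ c.toNat < o + 1 := by omega
        simp [h1, h2, h1']

lemma sum_codes (o : Nat) (t : List Char) :
    ((List.range o).map (fun v => (t.countP (fun x => decide (x.toNat = v)) : Int))).sum
      = (t.countP (fun x => decide (x.toNat < o)) : Int) := by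
  induction o with
  | zero => simp
  | succ o ih =>
    rw [List.range_succ, List.map_append, List.sum_append, ih, countP_lt_succ]
    push_cast
    simp

lemma take_codeTab (t : List Char) (o : Nat) (ho : o ≤ 256) :
    ((codeTab t).take o).sum = (t.countP (fun x => decide (x.toNat < o)) : Int) := by
  rw [codeTab, ← List.map_take, List.take_range, Nat.min_eq_left ho]
  exact sum_codes o t

lemma length_codeTab (t : List Char) : (codeTab t).length = 256 := by
  simp [codeTab]

lemma set_codeTab (t : List Char) (c : Char) (hc : c.toNat < 256) :
    (codeTab t).set c.toNat ((codeTab t).getD c.toNat 0 + 1) = codeTab (c :: t) := by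
  have hgetD : (codeTab t).getD c.toNat 0
      = (t.countP (fun x => decide (x.toNat = c.toNat)) : Int) := by
    rw [List.getD_eq_getElem _ _ (by rw [length_codeTab]; exact hc)]
    simp [codeTab]
  apply List.ext_getElem
  · simp [length_codeTab]
  · intro v hv1 hv2
    have hv : v < 256 := by
      have := hv1; rw [List.length_set, length_codeTab] at this; exact this
    rw [List.getElem_set]
    by_cases hveq : c.toNat = v
    · subst hveq
      simp [codeTab, List.countP_cons, hv]
    · have : ¬ (c.toNat = v) := hveq
      simp [codeTab, List.countP_cons, this]

lemma mod_rank (a b m : Int) :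
    ((a % 1000003) + b * (m % 1000003)) % 1000003 = (a + b * m) % 1000003 := by
  conv_rhs => rw [Int.add_emod, Int.mul_emod]
  conv_lhs => rw [Int.add_emod, Int.mul_emod b (m % 1000003),
    Int.emod_emod_of_dvd _ dvd_rfl, Int.emod_emod_of_dvd _ dvd_rfl]

lemma mod_fact (m j : Int) : (m % 1000003) * j % 1000003 = m * j % 1000003 := by
  conv_rhs => rw [Int.mul_emod]
  conv_lhs => rw [Int.mul_emod, Int.emod_emod_of_dvd _ dvd_rfl]

lemma foldB_eq : ∀ (t : List Char), (∀ c ∈ t, c.toNat < 256) →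
    List.foldr (fun c s => altStep s c) (List.replicate 256 0, 1, 0, 1) t
      = (codeTab t, ((t.length.factorial : Int)) % 1000003, (t.length : Int),
         (1 + (pvS t : Int)) % 1000003) := by
  intro t ht
  induction t with
  | nil =>
    have h0 : codeTab [] = List.replicate 256 (0 : Int) := by
      simp [codeTab]
    rw [List.foldr_nil, h0]
    norm_num [pvS]
  | cons c t ih =>
    have hc : c.toNat < 256 := ht c List.mem_cons_self
    have ht' : ∀ x ∈ t, x.toNat < 256 := fun x hx => ht x (List.mem_cons_of_mem c hx)
    rw [List.foldr_cons, ih ht']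
    show altStep _ c = _
    unfold altStep
    have htake : ((codeTab t).take c.toNat).sum = (cntSm t c : Int) := by
      have hcp : t.countP (fun x => decide (x.toNat < c.toNat)) = cntSm t c := by
        unfold cntSm
        apply List.countP_congr
        intro x _
        simp [char_lt_iff]
      rw [take_codeTab t c.toNat (le_of_lt hc), hcp]
    have hrank : ((1 + (pvS t : Int)) % 1000003
        + ((codeTab t).take c.toNat).sum * ((t.length.factorial : Int) % 1000003)) % 1000003
        = (1 + (pvS (c :: t) : Int)) % 1000003 := by
      rw [htake, mod_rank]
      congr 1
      simp only [pvS]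
      push_cast
      ring
    have hf : ((t.length.factorial : Int) % 1000003) * ((t.length : Int) + 1) % 1000003
        = (((c :: t : List Char).length.factorial : Int)) % 1000003 := by
      rw [mod_fact]
      congr 1
      simp [Nat.factorial_succ]
      ring
    have hcnt := set_codeTab t c hc
    simp only []
    rw [hcnt, hrank, hf]
    simp

-- ===== VERDICT (by name: the statement is the Claim_ definition above) =====
theorem srt_permB_spec : Claim_equal_srt_permB := by
  unfold Claim_equal_srt_permB
  intro A hDom
  unfold Spec_srt_permB
  have hcodes : ∀ c ∈ A.toList, c.toNat < 256 := by
    intro c hcmem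
    unfold Dom_srt_permB pvDomStr at hDom
    rw [List.all_eq_true] at hDom
    have := hDom c hcmem
    unfold pvDomChar at this
    simp at this
    omega
  have hA : srt_permB A = (1 + (pvS A.toList : Int)) % 1000003 := by
    unfold srt_permB
    exact loopA_eq A.toList.length A.toList _ 1 (le_refl _)
      (PySem.List.sorted_perm A.toList (fun x => x) false)
      (PySem.List.sorted_pairwise A.toList (fun x => x))
  have hB : srt_permB_alt A = (1 + (pvS A.toList : Int)) % 1000003 := by
    unfold srt_permB_alt
    rw [List.foldl_reverse, foldB_eq A.toList hcodes]
  rw [hA, hB]
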